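-- pv_equiv track=rewrite | github.com/LeroyAdrien/Kython | kython/pp.py | Compute_NJ_Minimal_Distance
-- ===== SOURCE A (Python) =====
-- def Compute_NJ_Minimal_Distance(matrice):
--     imin=1
--     jmin=0
--     minimal=matrice[imin][jmin]
--     for i in range(1,len(matrice)):
--         for j in range(0,i):
--             if matrice[i][j]<minimal:
--                 minimal=matrice[i][j]
--                 imin=i
--                 jmin=j
--     return(imin,jmin)
-- ===== SOURCE B (Python) =====
-- def Compute_NJ_Minimal_Distance(matrice):
--     cands = [(matrice[i][j], i, j)
--              for i in range(1, len(matrice)) for j in range(i)]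
--     cands.sort(key=lambda t: t[0])
--     _, imin, jmin = cands[0]
--     return (imin, jmin)
-- ===== Notes on version B (the rewrite author's own statement) =====
-- stated objective: alternative
-- what changed: A tracks a running (imin, jmin, minimal) accumulator through a nested row-major scan with strict <; B instead materialises the flattened list of (value, i, j) candidate triples, stable-sorts it by value, and returns the (i, j) of the first element — the stable sort over row-major order reproduces A's first-occurrence tie-breaking.
import Mathlib
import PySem

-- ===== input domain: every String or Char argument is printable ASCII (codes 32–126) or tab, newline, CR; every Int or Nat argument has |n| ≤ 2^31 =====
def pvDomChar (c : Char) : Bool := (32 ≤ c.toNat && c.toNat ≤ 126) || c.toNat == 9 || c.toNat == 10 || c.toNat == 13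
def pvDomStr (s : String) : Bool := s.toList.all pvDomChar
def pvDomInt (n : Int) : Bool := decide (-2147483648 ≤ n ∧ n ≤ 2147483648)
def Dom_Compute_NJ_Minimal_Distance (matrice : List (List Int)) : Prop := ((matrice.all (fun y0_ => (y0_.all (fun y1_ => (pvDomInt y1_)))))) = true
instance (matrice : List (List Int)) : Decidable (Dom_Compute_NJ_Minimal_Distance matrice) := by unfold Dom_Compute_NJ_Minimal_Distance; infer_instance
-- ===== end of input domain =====

-- B replaces A's running-minimum scan by sort-based selection: build the flattened list of
-- (value, i, j) candidates, stable-sort it by value, and take the first element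
-- (objective: alternative; same tie-breaking because the sort is stable over row-major order).

-- ===== PORT A =====
def Compute_NJ_Minimal_Distance (matrice : List (List Int)) : Int × Int :=
  let st :=
    (PySem.List.pyRange 1 (matrice.length : Int) 1).foldl
      (fun st i =>
        (PySem.List.pyRange 0 i 1).foldl
          (fun st j =>
            if PySem.List.pyGetD (PySem.List.pyGetD matrice i []) j 0 < st.2.2 then
              (i, j, PySem.List.pyGetD (PySem.List.pyGetD matrice i []) j 0)
            else st)
          st)
      (1, 0, PySem.List.pyGetD (PySem.List.pyGetD matrice 1 []) 0 0)
  (st.1, st.2.1)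

-- ===== PORT B =====
def Compute_NJ_Minimal_Distance_alt (matrice : List (List Int)) : Int × Int :=
  let cands :=
    (PySem.List.pyRange 1 (matrice.length : Int) 1).flatMap (fun i =>
      (PySem.List.pyRange 0 i 1).map (fun j =>
        (PySem.List.pyGetD (PySem.List.pyGetD matrice i []) j 0, i, j)))
  let sortedC := PySem.List.sorted cands (fun t => t.1) false
  let c := PySem.List.pyGetD sortedC 0 (0, 1, 0)
  (c.2.1, c.2.2)

-- ===== PRECONDITION & SPEC =====
-- exactly where Python A returns: ≥ 2 rows, and row i (i ≥ 1) has at least i entries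
def Pre_Compute_NJ_Minimal_Distance (matrice : List (List Int)) : Prop :=
  2 ≤ matrice.length ∧ ∀ i ∈ List.range matrice.length, i ≤ (matrice.getD i []).length
instance (matrice : List (List Int)) : Decidable (Pre_Compute_NJ_Minimal_Distance matrice) := by
  unfold Pre_Compute_NJ_Minimal_Distance; infer_instance
def pvWitness_Compute_NJ_Minimal_Distance : List (List Int) := [[0], [5, 1]]

def Spec_Compute_NJ_Minimal_Distance (matrice : List (List Int)) (out : Int × Int) : Prop := out = Compute_NJ_Minimal_Distance_alt matrice
instance (matrice : List (List Int)) (out : Int × Int) : Decidable (Spec_Compute_NJ_Minimal_Distance matrice out) := by unfold Spec_Compute_NJ_Minimal_Distance; infer_instance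

-- ===== CLAIM (what is proved, stated in full; the proofs are below) =====
def Claim_equal_Compute_NJ_Minimal_Distance : Prop := ∀ (matrice : List (List Int)), Dom_Compute_NJ_Minimal_Distance matrice → Pre_Compute_NJ_Minimal_Distance matrice → Spec_Compute_NJ_Minimal_Distance matrice (Compute_NJ_Minimal_Distance matrice)

-- ===== LEMMAS AND PROOFS =====

-- B's candidate triple for entry (i, j): (value, i, j)
def pvCand (matrice : List (List Int)) (i j : Int) : Int × Int × Int :=
  (PySem.List.pyGetD (PySem.List.pyGetD matrice i []) j 0, i, j)

-- the "keep the first strict minimum by value" step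
def pvMin (s c : Int × Int × Int) : Int × Int × Int := if c.1 < s.1 then c else s

-- reorder a B-triple (v, i, j) into A's state shape (i, j, v)
def pvTau (b : Int × Int × Int) : Int × Int × Int := (b.2.1, b.2.2, b.1)

-- insertion step of Python's stable sort, specialised to the value key
def pvIns (x : Int × Int × Int) (acc : List (Int × Int × Int)) : List (Int × Int × Int) :=
  PySem.List.insertBy (fun a b => decide (a.1 < b.1)) x acc

theorem pvMin_self (b : Int × Int × Int) : pvMin b b = b := by simp [pvMin]

-- A's fold is pvTau of the pvMin-fold over B's candidate list
theorem A_fold_eq (matrice : List (List Int)) :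
    Compute_NJ_Minimal_Distance matrice =
      (let r :=
        ((PySem.List.pyRange 1 (matrice.length : Int) 1).flatMap (fun i =>
          (PySem.List.pyRange 0 i 1).map (pvCand matrice i))).foldl pvMin (pvCand matrice 1 0)
       (r.2.1, r.2.2)) := by
  simp only [Compute_NJ_Minimal_Distance, List.foldl_flatMap]
  have hcast : ∀ st : Int × Int × Int,
      (1, 0, PySem.List.pyGetD (PySem.List.pyGetD matrice 1 []) 0 0) = pvTau (pvCand matrice 1 0) := by
    intro _; rfl
  rw [hcast (1,0,0)]
  rw [List.foldl_hom pvTau (g₁ := fun st i => ((PySem.List.pyRange 0 i 1).map (pvCand matrice i)).foldl pvMin st)]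
  · rfl
  · intro b i
    rw [List.foldl_map]
    exact List.foldl_hom pvTau (fun b j => by
      simp only [pvTau, pvMin, pvCand]
      by_cases h : PySem.List.pyGetD (PySem.List.pyGetD matrice i []) j 0 < b.1 <;> simp [h])

-- head of an insertion is the strict-< minimum of the head and the new element
theorem headD_pvIns (x y : Int × Int × Int) (ys : List (Int × Int × Int)) (d : Int × Int × Int) :
    (pvIns x (y :: ys)).headD d = pvMin y x := by
  simp only [pvIns, PySem.List.insertBy, pvMin]
  by_cases h : x.1 < y.1 <;> simp [h]

theorem pvIns_ne_nil (x : Int × Int × Int) (acc : List (Int × Int × Int)) : pvIns x acc ≠ [] := by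
  cases acc with
  | nil => simp [pvIns, PySem.List.insertBy]
  | cons y ys =>
      simp only [pvIns, PySem.List.insertBy]
      split <;> simp

-- the head of the insertion-sort fold is the running first-minimum
theorem headD_foldl_pvIns (l : List (Int × Int × Int)) :
    ∀ (acc : List (Int × Int × Int)) (d : Int × Int × Int), acc ≠ [] →
      (l.foldl (fun a x => pvIns x a) acc).headD d = l.foldl pvMin (acc.headD d) := by
  induction l with
  | nil => intro acc d _; rfl
  | cons x xs ih =>
      intro acc d hacc
      cases acc with
      | nil => exact absurd rfl hacc
      | cons y ys =>
          simp only [List.foldl_cons]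
          rw [ih (pvIns x (y :: ys)) d (pvIns_ne_nil x _), headD_pvIns]
          rfl

-- on any input with at least two rows the two ports' results coincide
theorem main_eq (matrice : List (List Int)) (hlen : 2 ≤ matrice.length) :
    Compute_NJ_Minimal_Distance matrice = Compute_NJ_Minimal_Distance_alt matrice := by
  have hn : (1 : Int) < (matrice.length : Int) := by exact_mod_cast hlen
  -- the candidate list starts with the seed candidate (i = 1, j = 0)
  set rest := (PySem.List.pyRange 2 (matrice.length : Int) 1).flatMap (fun i =>
      (PySem.List.pyRange 0 i 1).map (pvCand matrice i)) with hrest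
  have hL : (PySem.List.pyRange 1 (matrice.length : Int) 1).flatMap (fun i =>
      (PySem.List.pyRange 0 i 1).map (pvCand matrice i)) = pvCand matrice 1 0 :: rest := by
    rw [PySem.List.pyRange_one_cons hn]
    simp only [List.flatMap_cons]
    rw [show (1 : Int) + 1 = 2 by norm_num]
    rw [show PySem.List.pyRange 0 1 1 = [0] from rfl]
    rfl
  -- left side: A as a pvMin fold over the candidate list
  rw [A_fold_eq, hL]
  -- right side: head of the stable sort is the same fold
  show _ = Compute_NJ_Minimal_Distance_alt matrice
  simp only [Compute_NJ_Minimal_Distance_alt]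
  have hcands : (PySem.List.pyRange 1 (matrice.length : Int) 1).flatMap (fun i =>
      (PySem.List.pyRange 0 i 1).map (fun j =>
        (PySem.List.pyGetD (PySem.List.pyGetD matrice i []) j 0, i, j)))
      = pvCand matrice 1 0 :: rest := hL
  rw [hcands]
  have e2 : (PySem.List.sorted (pvCand matrice 1 0 :: rest)
      (fun t : Int × Int × Int => t.1) false).headD ((0 : Int), (1 : Int), (0 : Int))
      = rest.foldl pvMin (pvCand matrice 1 0) := by
    rw [PySem.List.sorted_eq_foldl_insertBy]
    rw [show List.foldl (fun acc x => PySem.List.insertBy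
          (fun a b : Int × Int × Int => decide (a.1 < b.1)) x acc)
          ([] : List (Int × Int × Int)) (pvCand matrice 1 0 :: rest)
        = List.foldl (fun a x => pvIns x a) [pvCand matrice 1 0] rest from rfl]
    rw [headD_foldl_pvIns rest [pvCand matrice 1 0] _ (by simp)]
    rfl
  have hsne : PySem.List.sorted (pvCand matrice 1 0 :: rest)
      (fun t : Int × Int × Int => t.1) false ≠ [] := by
    intro h
    exact List.cons_ne_nil _ _ ((PySem.List.sorted_eq_nil_iff _ _ _).mp h)
  obtain ⟨m, t, hmt⟩ : ∃ m t, PySem.List.sorted (pvCand matrice 1 0 :: rest)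
      (fun t : Int × Int × Int => t.1) false = m :: t := by
    cases h : PySem.List.sorted (pvCand matrice 1 0 :: rest)
        (fun t : Int × Int × Int => t.1) false with
    | nil => exact absurd h hsne
    | cons m t => exact ⟨m, t, rfl⟩
  have hget : PySem.List.pyGetD (m :: t) 0 ((0 : Int), (1 : Int), (0 : Int)) = m := by
    rw [PySem.List.pyGetD_eq_getElem (m :: t) _ (by norm_num) (by simp)]
    rfl
  rw [hmt] at e2
  simp only [List.headD_cons] at e2
  rw [hmt, hget, e2]
  simp only [List.foldl_cons, pvMin_self]

-- ===== VERDICT (by name: the statement is the Claim_ definition above) =====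
theorem Compute_NJ_Minimal_Distance_spec : Claim_equal_Compute_NJ_Minimal_Distance := by
  intro matrice _ hpre
  exact (main_eq matrice hpre.1).symm ▸ rfl
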